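-- pv_equiv track=rewrite | github.com/karnzx/ESCD | src/funny_strings.py | funny_strings
-- ===== SOURCE A (Python) =====
-- def funny_strings(s):
--     rInt = []
--     sInt = []
--     r = s[::-1]
--     for i in range(len(s) - 1):
--         rInt.append(abs(ord(r[i]) - ord(r[i + 1])))
--         sInt.append(abs(ord(s[i]) - ord(s[i + 1])))
--     if rInt == sInt:
--         return "Funny"
--     else:
--         return "Not Funny"
-- ===== SOURCE B (Python) =====
-- def funny_strings(s):
--     n = len(s)
--     for i in range((n - 1) // 2):
--         if abs(ord(s[i]) - ord(s[i + 1])) != abs(ord(s[n - 2 - i]) - ord(s[n - 1 - i])):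
--             return "Not Funny"
--     return "Funny"
-- ===== Notes on version B (the rewrite author's own statement) =====
-- stated objective: faster
-- what changed: Instead of building the reversed string and two full difference lists and comparing them, B scans once with two mirrored indices over the implicit difference sequence and exits early at the first mismatch.
import Mathlib
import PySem

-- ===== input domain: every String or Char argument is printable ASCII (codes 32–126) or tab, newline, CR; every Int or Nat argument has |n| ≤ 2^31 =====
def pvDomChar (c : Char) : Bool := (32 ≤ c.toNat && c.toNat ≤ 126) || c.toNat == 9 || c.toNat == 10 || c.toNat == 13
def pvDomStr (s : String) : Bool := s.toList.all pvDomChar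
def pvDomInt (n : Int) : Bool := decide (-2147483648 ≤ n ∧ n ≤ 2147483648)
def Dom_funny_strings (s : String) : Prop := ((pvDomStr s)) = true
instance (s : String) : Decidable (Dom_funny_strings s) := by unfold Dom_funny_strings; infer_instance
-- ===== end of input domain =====

-- B replaces A's reversed string and two built difference lists by one pass with two
-- mirrored indices over the implicit difference sequence, with early exit (constant-factor faster).

-- |ord s[i] - ord s[i+1]| as an Int (indices are always in range where used)
def dchar (l : List Char) (i : Nat) : Int :=
  |((l.getD i ' ').toNat : Int) - ((l.getD (i + 1) ' ').toNat : Int)|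

-- ===== PORT A =====
def funny_strings (s : String) : String :=
  let l := s.toList
  let r := l.reverse
  let p := (List.range (l.length - 1)).foldl
    (fun (acc : List Int × List Int) i => (acc.1 ++ [dchar r i], acc.2 ++ [dchar l i]))
    ([], [])
  if p.1 = p.2 then "Funny" else "Not Funny"

-- ===== PORT B =====
def fsLoop (l : List Char) (n i : Nat) : String :=
  if h : i < (n - 1) / 2 then
    if dchar l i = dchar l (n - 2 - i) then fsLoop l n (i + 1) else "Not Funny"
  else
    "Funny"
termination_by (n - 1) / 2 - i
decreasing_by omega

def funny_strings_alt (s : String) : String :=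
  fsLoop s.toList s.toList.length 0

-- ===== PRECONDITION & SPEC =====
def Spec_funny_strings (s : String) (out : String) : Prop := out = funny_strings_alt s
instance (s : String) (out : String) : Decidable (Spec_funny_strings s out) := by unfold Spec_funny_strings; infer_instance

-- ===== CLAIM (what is proved, stated in full; the proofs are below) =====
def Claim_equal_funny_strings : Prop := ∀ (s : String), Dom_funny_strings s → Spec_funny_strings s (funny_strings s)

-- ===== LEMMAS AND PROOFS =====

lemma foldl_pairs (f g : Nat → Int) (xs : List Nat) (a b : List Int) :
    xs.foldl (fun acc i => (acc.1 ++ [f i], acc.2 ++ [g i])) (a, b) = (a ++ xs.map f, b ++ xs.map g) := by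
  induction xs generalizing a b with
  | nil => simp
  | cons x xs ih => simp [List.foldl_cons, ih]

lemma map_range_eq_iff (f g : Nat → Int) (m : Nat) :
    (List.range m).map f = (List.range m).map g ↔ ∀ i < m, f i = g i := by
  constructor
  · intro h i hi
    have := congrArg (fun l => l.getD i 0) h
    simpa [List.getD_eq_getElem, hi] using this
  · intro h
    apply List.ext_getElem (by simp)
    intro i h1 h2
    simp only [List.getElem_map, List.getElem_range]
    exact h i (by simpa using h1)

lemma dchar_reverse (l : List Char) (i : Nat) (h : i + 1 < l.length) :
    dchar l.reverse i = dchar l (l.length - 2 - i) := by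
  have h1 : i < l.reverse.length := by simp; omega
  have h2 : i + 1 < l.reverse.length := by simp; omega
  have h3 : l.length - 2 - i < l.length := by omega
  have h4 : l.length - 2 - i + 1 < l.length := by omega
  have e1 : l.length - 1 - i = l.length - 2 - i + 1 := by omega
  have e2 : l.length - 1 - (i + 1) = l.length - 2 - i := by omega
  simp only [dchar, List.getD_eq_getElem _ _ h1, List.getD_eq_getElem _ _ h2,
    List.getD_eq_getElem _ _ h3, List.getD_eq_getElem _ _ h4,
    List.getElem_reverse]
  rw [abs_sub_comm]
  simp only [show l.length - 1 - (i + 1) = l.length - 2 - i from by omega,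
    show l.length - 1 - i = l.length - 2 - i + 1 from by omega]

-- A's result as a decidable pointwise condition on the difference sequence
lemma funny_strings_eq (s : String) :
    funny_strings s =
      if (∀ i < s.toList.length - 1,
            dchar s.toList (s.toList.length - 2 - i) = dchar s.toList i)
      then "Funny" else "Not Funny" := by
  unfold funny_strings
  simp only [foldl_pairs, List.nil_append]
  apply if_congr _ rfl rfl
  have hmap : (List.range (s.toList.length - 1)).map (dchar s.toList.reverse)
      = (List.range (s.toList.length - 1)).map
          (fun i => dchar s.toList (s.toList.length - 2 - i)) := by
    apply List.map_congr_left
    intro i hi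
    exact dchar_reverse s.toList i (by have := List.mem_range.mp hi; omega)
  rw [hmap, map_range_eq_iff]

-- B's loop as a decidable pointwise condition
lemma fsLoop_eq (l : List Char) (n : Nat) :
    ∀ k i, (n - 1) / 2 - i ≤ k →
      fsLoop l n i =
        if (∀ j < (n - 1) / 2, i ≤ j → dchar l j = dchar l (n - 2 - j))
        then "Funny" else "Not Funny" := by
  intro k
  induction k with
  | zero =>
    intro i hk
    rw [fsLoop]
    rw [dif_neg (by omega), if_pos]
    intro j hj hij; omega
  | succ k ih =>
    intro i hk
    rw [fsLoop]
    by_cases hi : i < (n - 1) / 2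
    · rw [dif_pos hi]
      by_cases hd : dchar l i = dchar l (n - 2 - i)
      · rw [if_pos hd, ih (i + 1) (by omega)]
        apply if_congr _ rfl rfl
        constructor
        · intro h j hj hij
          rcases Nat.eq_or_lt_of_le hij with he | hlt
          · subst he; exact hd
          · exact h j hj hlt
        · intro h j hj hij
          exact h j hj (by omega)
      · rw [if_neg hd, if_neg]
        intro h
        exact hd (h i hi le_rfl)
    · rw [dif_neg hi, if_pos]
      intro j hj hij; omega

-- the half-range check over mirrored indices is equivalent to the full pointwise condition
lemma half_iff (D : Nat → Int) (n : Nat) :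
    (∀ i < n - 1, D (n - 2 - i) = D i) ↔
    (∀ j < (n - 1) / 2, 0 ≤ j → D j = D (n - 2 - j)) := by
  constructor
  · intro h j hj _
    exact (h j (by omega)).symm
  · intro h i hi
    by_cases hc : i < (n - 1) / 2
    · exact (h i hc (by omega)).symm
    · by_cases hm : n - 2 - i = i
      · rw [hm]
      · set j := n - 2 - i with hjdef
        have hj : j < (n - 1) / 2 := by omega
        have := h j hj (by omega)
        have hji : n - 2 - j = i := by omega
        rw [hji] at this
        exact this

lemma main_eq (s : String) : funny_strings s = funny_strings_alt s := by
  rw [funny_strings_eq]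
  unfold funny_strings_alt
  rw [fsLoop_eq s.toList s.toList.length ((s.toList.length - 1) / 2 - 0) 0 le_rfl]
  apply if_congr _ rfl rfl
  rw [half_iff (dchar s.toList) s.toList.length]

-- ===== VERDICT (by name: the statement is the Claim_ definition above) =====
theorem funny_strings_spec : Claim_equal_funny_strings := by
  intro s _
  unfold Spec_funny_strings
  exact main_eq s
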